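-- pv_equiv track=rewrite | github.com/SamuelVanie/IA-algo-demo-theoreme | app/bin/main/refutation.py | around_unary_op
-- ===== SOURCE A (Python) =====
-- def forward_slice(sentence, index):
--     """
--     Returns forward slice of sentence begining from index.
--     Let us define forward slice as next complete segment in sentence.
--     Examples:
--         Forward Slice from index = 2 of "A(B(!C&D))" is "(B(!C&D))"
--         Forward Slice from index = 3 of "A(B(!C&D))" is "B"
--         Forward Slice from index = 4 of "A(B(!C&D))" is "(!C&D)"
--         Forward Slice from index = 5 of "A(B(!C&D))" is "!C"
--
--     @param sentence (list)
--     : Propositional Sentence or Formula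
--     @param index (int)
--     : Index from which slicing should begin (included)
--     """
--     off_balance = 0
--     i = index
--
--     while i < len(sentence):
--         off_balance += 1 if sentence[i] == "(" else -1 if sentence[i] == ")" else 0
--         if off_balance == 0 and sentence[i] != "!":
--             return sentence[index : (i + 1)], i
--         i += 1
--
-- def around_unary_op(sentence, op):
--     processed_sentence = []
--     i = 0
--     while i < len(sentence):
--         if sentence[i] == op:
--             i += 1
--             sentence_slice, i = forward_slice(sentence, i)
--             sentence_slice = around_unary_op(sentence_slice, op)
--             processed_sentence += ["(", "!"] + sentence_slice.copy() + [")"]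
--         else:
--             processed_sentence.append(sentence[i])
--         i += 1
--     return processed_sentence
-- ===== SOURCE B (Python) =====
-- def around_unary_op(sentence, op):
--     # Single linear pass with an explicit stack of pending wrap-counts:
--     # each op opens "( !" and schedules one ")" to be emitted when the
--     # segment that follows it completes; no rescanning, no recursion.
--     result = []
--     pend = 0          # ")"s to emit when the current segment completes
--     stack = []        # pending counts of enclosing parenthesis levels
--     for tok in sentence:
--         if tok == op:
--             result += ["(", "!"]
--             pend += 1
--         elif tok == "(":
--             result.append("(")
--             stack.append(pend)
--             pend = 0
--         elif tok == ")":
--             result.append(")")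
--             pend = stack.pop() if stack else 0
--             result += [")"] * pend
--             pend = 0
--         elif tok == "!":
--             result.append("!")
--         else:
--             result.append(tok)
--             result += [")"] * pend
--             pend = 0
--     return result
-- ===== Notes on version B (the rewrite author's own statement) =====
-- stated objective: alternative
-- what changed: Replaced A's recursive rescan (forward_slice extracts each segment, which is then recursively re-processed and copied) by one linear left-to-right pass that keeps a counter of pending closing parentheses plus a stack of such counters per bracket level.
-- outside the precondition, e.g. on around_unary_op(['(', 'A', ')'], '('): A returns ['(', '!', 'A', ')', ')'], B returns ['(', '!', 'A', ')', ')']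
import Mathlib
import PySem

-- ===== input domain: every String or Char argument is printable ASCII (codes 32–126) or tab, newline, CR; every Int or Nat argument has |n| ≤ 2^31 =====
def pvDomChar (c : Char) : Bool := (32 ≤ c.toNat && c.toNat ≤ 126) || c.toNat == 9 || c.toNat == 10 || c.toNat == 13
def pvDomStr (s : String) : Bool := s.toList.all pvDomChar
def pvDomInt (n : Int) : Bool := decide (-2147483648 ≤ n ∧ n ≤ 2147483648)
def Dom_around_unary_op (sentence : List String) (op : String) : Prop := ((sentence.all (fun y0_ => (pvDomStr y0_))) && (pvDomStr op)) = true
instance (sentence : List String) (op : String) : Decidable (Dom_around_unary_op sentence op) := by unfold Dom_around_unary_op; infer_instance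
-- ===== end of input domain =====

-- B replaces A's recursive rescanning of bracket segments by one linear pass
-- with a stack of pending close-paren counts (objective: alternative algorithm).
-- ===== PORT A =====
-- forward_slice: the index i into `sentence` is represented by the suffix
-- starting at i, so the returned pair (slice, i) becomes (slice, suffix after i).
def fsliceGo (off : Int) : List String → Option (List String × List String)
  | [] => none          -- Python: loop falls through, returns None
  | t :: r =>
    let off' := off + (if t = "(" then 1 else if t = ")" then -1 else 0)
    if off' = 0 ∧ t ≠ "!" then some ([t], r)
    else
      match fsliceGo off' r with
      | some (seg, rest) => some (t :: seg, rest)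
      | none => none

theorem fsliceGo_length : ∀ (off : Int) (l seg rest : List String),
    fsliceGo off l = some (seg, rest) → seg.length + rest.length = l.length ∧ 1 ≤ seg.length := by
  intro off l
  induction l generalizing off with
  | nil => intro seg rest h; simp [fsliceGo] at h
  | cons t r ih =>
    intro seg rest h
    rw [fsliceGo] at h
    set o2 := off + (if t = "(" then 1 else if t = ")" then -1 else 0) with ho2
    by_cases hc : o2 = 0 ∧ t ≠ "!"
    · rw [if_pos hc] at h
      simp only [Option.some.injEq, Prod.mk.injEq] at h
      obtain ⟨h1, h2⟩ := h; subst h1; subst h2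
      refine ⟨?_, by simp⟩
      simp only [List.length_cons, List.length_nil]; omega
    · rw [if_neg hc] at h
      cases hrec : fsliceGo o2 r with
      | none => rw [hrec] at h; simp at h
      | some p =>
        rw [hrec] at h
        obtain ⟨seg', rest'⟩ := p
        simp only [Option.some.injEq, Prod.mk.injEq] at h
        obtain ⟨h1, h2⟩ := h; subst h1; subst h2
        have := ih _ _ _ hrec
        constructor
        · simp; omega
        · simp

-- around_unary_op: the while-loop over index i becomes recursion on the suffix.
def around_unary_op (sentence : List String) (op : String) : List String :=
  aGo op sentence
where
  aGo (op : String) : List String → List String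
    | [] => []
    | t :: r =>
      if t = op then
        match h : fsliceGo 0 r with
        | some (seg, rest) =>
          -- processed += ["(", "!"] + around(slice).copy() + [")"], i jumps past slice
          ["(", "!"] ++ aGo op seg ++ [")"] ++ aGo op rest
        | none => []   -- Python raises TypeError here (unpacking None); outside Pre_
      else
        t :: aGo op r
  termination_by l => l.length
  decreasing_by
    all_goals first
      | (have := fsliceGo_length _ _ _ _ h; simp only [List.length_cons]; omega)
      | (simp only [List.length_cons]; omega)

-- ===== PORT B =====
def bGo (op : String) : List String → Nat → List Nat → List String
  | [], _, _ => []
  | t :: r, pend, stack =>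
    if t = op then "(" :: "!" :: bGo op r (pend + 1) stack
    else if t = "(" then "(" :: bGo op r 0 (pend :: stack)
    else if t = ")" then
      match stack with
      | p :: st => ")" :: (List.replicate p ")" ++ bGo op r 0 st)
      | [] => ")" :: bGo op r 0 []
    else if t = "!" then "!" :: bGo op r pend stack
    else t :: (List.replicate pend ")" ++ bGo op r 0 stack)

def around_unary_op_alt (sentence : List String) (op : String) : List String :=
  bGo op sentence 0 []

-- ===== PRECONDITION & SPEC =====
-- `chk` is a linear shape check: parentheses balance, and after `op` (or after
-- a "!" inside a segment opened by `op`) a proper segment must follow.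
def chk (op : String) : List String → Nat → Bool → Bool
  | [], d, need => !need && d == 0
  | t :: r, d, need =>
    if t = op then (if need && !(op == "!") then false else chk op r d true)
    else if t = "!" then chk op r d need
    else if t = "(" then chk op r (d + 1) false
    else if t = ")" then (if need then false else (decide (0 < d) && chk op r (d - 1) false))
    else chk op r d false

-- Pre_ excludes exactly the irregular inputs: sentences where some occurrence of
-- op is not followed by a complete balanced segment (there A either raises
-- TypeError or glues together an accidental segment such as [")", "("]), and
-- sentences that contain op while op itself is a parenthesis token; on a few of
-- these irregular inputs A still returns and B happens to agree.
def Pre_around_unary_op (sentence : List String) (op : String) : Prop :=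
  ¬ (op ∈ sentence) ∨ (op ≠ "(" ∧ op ≠ ")" ∧ chk op sentence 0 false = true)
instance (sentence : List String) (op : String) : Decidable (Pre_around_unary_op sentence op) := by
  unfold Pre_around_unary_op; infer_instance

def pvWitness_around_unary_op : List String × String := (["!", "(", "A", "&", "!", "B", ")"], "!")

def Spec_around_unary_op (sentence : List String) (op : String) (out : List String) : Prop := out = around_unary_op_alt sentence op
instance (sentence : List String) (op : String) (out : List String) : Decidable (Spec_around_unary_op sentence op out) := by unfold Spec_around_unary_op; infer_instance

-- ===== CLAIM (what is proved, stated in full; the proofs are below) =====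
def Claim_equal_around_unary_op : Prop := ∀ (sentence : List String) (op : String), Dom_around_unary_op sentence op → Pre_around_unary_op sentence op → Spec_around_unary_op sentence op (around_unary_op sentence op)

-- ===== LEMMAS AND PROOFS =====

-- Well-formed items (flag true) and sequences (flag false) w.r.t. op.
inductive Wf (op : String) : Bool → List String → Prop
  | atom (a : String) : a ≠ op → a ≠ "!" → a ≠ "(" → a ≠ ")" → Wf op true [a]
  | par (s : List String) : Wf op false s → Wf op true ("(" :: s ++ [")"])
  | bang (t : List String) : Wf op true t → Wf op true ("!" :: t)
  | nil : Wf op false []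
  | consI (t s : List String) : Wf op true t → (∀ u ts, t = u :: ts → u ≠ op) →
      Wf op false s → Wf op false (t ++ s)
  | consOp (t s : List String) : Wf op true t → Wf op false s → Wf op false (op :: (t ++ s))
  | consBang (s : List String) : op ≠ "!" → Wf op false s → Wf op false ("!" :: s)

-- "d open brackets still to be closed": wf pieces separated by d closing brackets
inductive Nest (op : String) : Nat → List String → Prop
  | zero (s : List String) : Wf op false s → Nest op 0 s
  | succ (s : List String) (d : Nat) (l : List String) :
      Wf op false s → Nest op d l → Nest op (d + 1) (s ++ ")" :: l)

theorem nest_cons_item {op : String} {t l : List String} {d : Nat}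
    (ht : Wf op true t) (hh : ∀ u ts, t = u :: ts → u ≠ op) (hn : Nest op d l) :
    Nest op d (t ++ l) := by
  cases hn with
  | zero s hs => exact Nest.zero _ (Wf.consI _ _ ht hh hs)
  | succ s d l hs hn =>
    rw [← List.append_assoc]
    exact Nest.succ _ _ _ (Wf.consI _ _ ht hh hs) hn

theorem nest_cons_op {op : String} {t l : List String} {d : Nat}
    (ht : Wf op true t) (hn : Nest op d l) : Nest op d (op :: (t ++ l)) := by
  cases hn with
  | zero s hs => exact Nest.zero _ (Wf.consOp _ _ ht hs)
  | succ s d l hs hn =>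
    have he : op :: (t ++ (s ++ ")" :: l)) = (op :: (t ++ s)) ++ ")" :: l := by simp
    rw [he]
    exact Nest.succ _ _ _ (Wf.consOp _ _ ht hs) hn

theorem nest_cons_bang {op : String} {l : List String} {d : Nat}
    (hop : op ≠ "!") (hn : Nest op d l) : Nest op d ("!" :: l) := by
  cases hn with
  | zero s hs => exact Nest.zero _ (Wf.consBang _ hop hs)
  | succ s d l hs hn =>
    have he : "!" :: (s ++ ")" :: l) = ("!" :: s) ++ ")" :: l := by simp
    rw [he]
    exact Nest.succ _ _ _ (Wf.consBang _ hop hs) hn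

-- soundness of the linear checker
theorem chk_sound {op : String} : ∀ (l : List String) (d : Nat) (need : Bool),
    chk op l d need = true →
    (if need then ∃ t l', l = t ++ l' ∧ Wf op true t ∧ Nest op d l' else Nest op d l) := by
  intro l
  induction l with
  | nil =>
    intro d need h
    simp [chk] at h
    obtain ⟨h1, h2⟩ := h
    subst h1; subst h2
    simp
    exact Nest.zero _ Wf.nil
  | cons t r ih =>
    intro d need h
    rw [chk] at h
    by_cases ht : t = op
    · rw [if_pos ht] at h
      by_cases hb : (need && !(op == "!")) = true
      · rw [if_pos hb] at h; exact absurd h (by simp)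
      · rw [if_neg hb] at h
        have := ih d true h
        simp only [if_pos rfl] at this
        obtain ⟨it, l', heq, hit, hnest⟩ := this
        cases need with
        | false =>
          simp only [if_neg (Bool.false_ne_true)]
          subst ht; rw [heq]
          exact nest_cons_op hit hnest
        | true =>
          have hop : op = "!" := by
            simp only [Bool.true_and, Bool.not_eq_true', beq_eq_false_iff_ne, ne_eq] at hb
            simpa using hb
          simp only [if_pos rfl]
          refine ⟨"!" :: it, l', ?_, Wf.bang _ hit, hnest⟩
          rw [heq, ht, hop]; rfl
    · rw [if_neg ht] at h
      by_cases h1 : t = "!"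
      · rw [if_pos h1] at h
        have hopb : op ≠ "!" := fun e => ht (h1.trans e.symm)
        cases need with
        | false =>
          have := ih d false h
          simp only [if_neg (Bool.false_ne_true)] at this ⊢
          rw [h1]
          exact nest_cons_bang hopb this
        | true =>
          have := ih d true h
          simp only [if_pos rfl] at this ⊢
          obtain ⟨it, l', heq, hit, hnest⟩ := this
          exact ⟨"!" :: it, l', by simp [heq, h1], Wf.bang _ hit, hnest⟩
      · rw [if_neg h1] at h
        by_cases h2 : t = "("
        · rw [if_pos h2] at h
          have := ih (d + 1) false h
          simp only [if_neg (Bool.false_ne_true)] at this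
          cases this with
          | succ s d' l'' hs hn =>
            have hit : Wf op true ("(" :: s ++ [")"]) := Wf.par _ hs
            have hsh : t :: (s ++ ")" :: l'') = ("(" :: s ++ [")"]) ++ l'' := by
              rw [h2]; simp
            cases need with
            | false =>
              simp only [if_neg (Bool.false_ne_true)]
              rw [hsh]
              refine nest_cons_item hit ?_ hn
              intro u ts he
              have : u = "(" := by
                have := congrArg (fun l => l.head?) he
                simpa using this.symm
              rw [this]
              intro e; exact ht (h2.trans e)
            | true =>
              simp only [if_pos rfl]
              exact ⟨"(" :: s ++ [")"], l'', by rw [← hsh], hit, hn⟩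
        · rw [if_neg h2] at h
          by_cases h3 : t = ")"
          · rw [if_pos h3] at h
            cases need with
            | true => rw [if_pos rfl] at h; exact absurd h (by simp)
            | false =>
              rw [if_neg (Bool.false_ne_true)] at h
              simp only [Bool.and_eq_true, decide_eq_true_eq] at h
              obtain ⟨hd, hr⟩ := h
              have := ih (d - 1) false hr
              simp only [if_neg (Bool.false_ne_true)] at this ⊢
              obtain ⟨d', rfl⟩ : ∃ d', d = d' + 1 := ⟨d - 1, by omega⟩
              have : Nest op d' r := by simpa using this
              have := Nest.succ [] d' r Wf.nil this
              simpa [h3] using this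
          · rw [if_neg h3] at h
            have hit : Wf op true [t] := Wf.atom t ht h1 h2 h3
            cases need with
            | false =>
              have := ih d false h
              simp only [if_neg (Bool.false_ne_true)] at this ⊢
              have := nest_cons_item hit (by intro u ts he; cases he; exact ht) this
              simpa using this
            | true =>
              have := ih d false h
              simp only [if_neg (Bool.false_ne_true)] at this
              simp only [if_pos rfl]
              exact ⟨[t], r, rfl, hit, this⟩

theorem chk_wf {op : String} {l : List String} (h : chk op l 0 false = true) : Wf op false l := by
  have h2 := chk_sound (op := op) l 0 false h
  simp only [if_neg (Bool.false_ne_true)] at h2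
  cases h2 with
  | zero s hs => exact hs

-- unfolding helpers for the ports
theorem aGo_nil {op : String} : around_unary_op.aGo op [] = [] := by
  rw [around_unary_op.aGo]

theorem aGo_cons_ne {op t : String} {r : List String} (h : t ≠ op) :
    around_unary_op.aGo op (t :: r) = t :: around_unary_op.aGo op r := by
  rw [around_unary_op.aGo, if_neg h]

theorem aGo_cons_op {op : String} {r seg rest : List String}
    (hf : fsliceGo 0 r = some (seg, rest)) :
    around_unary_op.aGo op (op :: r) =
      ["(", "!"] ++ around_unary_op.aGo op seg ++ [")"] ++ around_unary_op.aGo op rest := by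
  rw [around_unary_op.aGo, if_pos rfl]
  split
  · next seg' rest' heq =>
    rw [hf] at heq
    cases heq
    rfl
  · next heq => rw [hf] at heq; cases heq

theorem fsliceGo_cons (off : Int) (t : String) (r : List String) :
    fsliceGo off (t :: r) =
      (if off + (if t = "(" then 1 else if t = ")" then -1 else 0) = 0 ∧ t ≠ "!" then
        some ([t], r)
       else (fsliceGo (off + (if t = "(" then 1 else if t = ")" then -1 else 0)) r).map
         (fun p => (t :: p.1, p.2))) := by
  rw [fsliceGo]
  by_cases hc : off + (if t = "(" then 1 else if t = ")" then -1 else 0) = 0 ∧ t ≠ "!"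
  · rw [if_pos hc, if_pos hc]
  · rw [if_neg hc, if_neg hc]
    cases hx : fsliceGo (off + (if t = "(" then 1 else if t = ")" then -1 else 0)) r with
    | none => rfl
    | some p => cases p; rfl

theorem bGo_cons (op t : String) (r : List String) (pend : Nat) (stack : List Nat) :
    bGo op (t :: r) pend stack =
      (if t = op then "(" :: "!" :: bGo op r (pend + 1) stack
       else if t = "(" then "(" :: bGo op r 0 (pend :: stack)
       else if t = ")" then
         match stack with
         | p :: st => ")" :: (List.replicate p ")" ++ bGo op r 0 st)
         | [] => ")" :: bGo op r 0 []
       else if t = "!" then "!" :: bGo op r pend stack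
       else t :: (List.replicate pend ")" ++ bGo op r 0 stack)) := rfl

-- scanning a balanced piece with positive off never completes inside it
theorem fslice_skip {op : String} (hop1 : op ≠ "(") (hop2 : op ≠ ")") {b : Bool} {s : List String}
    (hw : Wf op b s) : ∀ (off : Int) (r : List String), 1 ≤ off →
    fsliceGo off (s ++ r) = (fsliceGo off r).map (fun p => (s ++ p.1, p.2)) := by
  induction hw with
  | atom a ha1 ha2 ha3 ha4 =>
    intro off r hoff
    simp only [List.cons_append, List.nil_append]
    rw [fsliceGo_cons, if_neg ha3, if_neg ha4]
    rw [if_neg (by rintro ⟨he, -⟩; omega)]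
    cases hx : fsliceGo (off + 0) r with
    | none => rw [add_zero] at hx; simp [hx]
    | some p => rw [add_zero] at hx; cases p; simp [hx]
  | par s hs ihs =>
    intro off r hoff
    have h1 : ("(" : String) ≠ ")" := by decide
    have h2 : ("(" : String) ≠ "!" := by decide
    have h3 : (")" : String) ≠ "(" := by decide
    have h4 : (")" : String) ≠ "!" := by decide
    simp only [List.cons_append, List.append_assoc, List.singleton_append, List.nil_append]
    rw [fsliceGo_cons, if_pos rfl, if_neg (by rintro ⟨he, -⟩; omega)]
    rw [ihs (off + 1) (")" :: r) (by omega)]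
    rw [fsliceGo_cons, if_neg h3, if_pos rfl, if_neg (by rintro ⟨he, -⟩; omega)]
    cases hx : fsliceGo (off + 1 + -1) r with
    | none =>
      have : off + 1 + -1 = off := by omega
      rw [this] at hx; simp [hx]
    | some p =>
      have : off + 1 + -1 = off := by omega
      rw [this] at hx; cases p; simp [hx]
  | bang t ht iht =>
    intro off r hoff
    have h1 : ("!" : String) ≠ "(" := by decide
    have h2 : ("!" : String) ≠ ")" := by decide
    simp only [List.cons_append]
    rw [fsliceGo_cons, if_neg h1, if_neg h2, if_neg (by rintro ⟨-, he⟩; exact he rfl)]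
    rw [add_zero, iht off r hoff]
    cases hx : fsliceGo off r with
    | none => simp [hx]
    | some p => cases p; simp [hx]
  | nil =>
    intro off r hoff
    simp only [List.nil_append]
    cases hx : fsliceGo off r with
    | none => simp [hx]
    | some p => cases p; simp [hx]
  | consI t s ht hh hs iht ihs =>
    intro off r hoff
    rw [List.append_assoc, iht off (s ++ r) hoff, ihs off r hoff]
    cases hx : fsliceGo off r with
    | none => simp [hx]
    | some p => cases p; simp [hx]
  | consOp t s ht hs iht ihs =>
    intro off r hoff
    simp only [List.cons_append, List.append_assoc]
    rw [fsliceGo_cons, if_neg hop1, if_neg hop2, if_neg (by rintro ⟨he, -⟩; omega)]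
    rw [add_zero, ← List.append_assoc, List.append_assoc, iht off (s ++ r) hoff, ihs off r hoff]
    cases hx : fsliceGo off r with
    | none => simp [hx]
    | some p => cases p; simp [hx]
  | consBang s hob hs ihs =>
    intro off r hoff
    have h1 : ("!" : String) ≠ "(" := by decide
    have h2 : ("!" : String) ≠ ")" := by decide
    simp only [List.cons_append]
    rw [fsliceGo_cons, if_neg h1, if_neg h2, if_neg (by rintro ⟨-, he⟩; exact he rfl)]
    rw [add_zero, ihs off r hoff]
    cases hx : fsliceGo off r with
    | none => simp [hx]
    | some p => cases p; simp [hx]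

-- forward_slice of a well-formed item is exactly that item
theorem fslice_item {op : String} (hop1 : op ≠ "(") (hop2 : op ≠ ")") {b : Bool} {t : List String}
    (hw : Wf op b t) : b = true → ∀ r : List String, fsliceGo 0 (t ++ r) = some (t, r) := by
  induction hw with
  | atom a ha1 ha2 ha3 ha4 =>
    intro _ r
    simp only [List.cons_append, List.nil_append]
    rw [fsliceGo_cons, if_neg ha3, if_neg ha4, if_pos (by constructor <;> simp [ha2])]
  | par s hs ihs =>
    intro _ r
    have h3 : (")" : String) ≠ "(" := by decide
    have h4 : (")" : String) ≠ "!" := by decide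
    simp only [List.cons_append, List.append_assoc, List.singleton_append, List.nil_append]
    rw [fsliceGo_cons, if_pos rfl, if_neg (by rintro ⟨he, -⟩; omega)]
    rw [fslice_skip hop1 hop2 hs (0 + 1) (")" :: r) (by omega)]
    rw [fsliceGo_cons, if_neg h3, if_pos rfl, if_pos (by constructor <;> [omega; exact h4])]
    simp
  | bang t ht iht =>
    intro _ r
    have h1 : ("!" : String) ≠ "(" := by decide
    have h2 : ("!" : String) ≠ ")" := by decide
    simp only [List.cons_append]
    rw [fsliceGo_cons, if_neg h1, if_neg h2, if_neg (by rintro ⟨-, he⟩; exact he rfl)]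
    rw [add_zero, iht rfl r]
    rfl
  | nil => intro h; cases h
  | consI t s ht hh hs iht ihs => intro h; cases h
  | consOp t s ht hs iht ihs => intro h; cases h
  | consBang s hob hs ihs => intro h; cases h

-- A is compositional on well-formed pieces
theorem aGo_append {op : String} (hop1 : op ≠ "(") (hop2 : op ≠ ")") {b : Bool} {l : List String}
    (hw : Wf op b l) : ∀ x : List String,
    around_unary_op.aGo op (l ++ x) = around_unary_op.aGo op l ++ around_unary_op.aGo op x := by
  induction hw with
  | atom a ha1 ha2 ha3 ha4 =>
    intro x
    simp only [List.cons_append, List.nil_append]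
    rw [aGo_cons_ne ha1, aGo_cons_ne ha1, aGo_nil]
    simp
  | par s hs ihs =>
    intro x
    have hp1 : ("(" : String) ≠ op := fun e => hop1 e.symm
    have hp2 : (")" : String) ≠ op := fun e => hop2 e.symm
    simp only [List.cons_append, List.append_assoc, List.singleton_append, List.nil_append]
    rw [aGo_cons_ne hp1, aGo_cons_ne hp1, ihs (")" :: x), ihs [")"],
      aGo_cons_ne hp2, aGo_cons_ne hp2, aGo_nil]
    simp
  | bang t ht iht =>
    intro x
    by_cases hbo : op = "!"
    · subst hbo
      simp only [List.cons_append]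
      rw [aGo_cons_op (by simpa using fslice_item hop1 hop2 ht rfl x),
        aGo_cons_op (r := t) (by simpa using fslice_item hop1 hop2 ht rfl [])]
      simp [aGo_nil]
    · have hb : ("!" : String) ≠ op := fun e => hbo e.symm
      simp only [List.cons_append]
      rw [aGo_cons_ne hb, aGo_cons_ne hb, iht x]
      simp
  | nil => intro x; rw [aGo_nil]; simp
  | consI t s ht hh hs iht ihs =>
    intro x
    rw [List.append_assoc, iht (s ++ x), iht s, ihs x]
    simp
  | consOp t s ht hs iht ihs =>
    intro x
    simp only [List.cons_append, List.append_assoc]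
    rw [aGo_cons_op (by simpa using fslice_item hop1 hop2 ht rfl (s ++ x)),
      aGo_cons_op (r := t ++ s) (fslice_item hop1 hop2 ht rfl s), ihs x]
    simp
  | consBang s hob hs ihs =>
    intro x
    have hb : ("!" : String) ≠ op := fun e => hob e.symm
    simp only [List.cons_append]
    rw [aGo_cons_ne hb, aGo_cons_ne hb, ihs x]
    simp

-- main correspondence between B\'s linear pass and A\'s recursion
theorem bGo_wf {op : String} (hop1 : op ≠ "(") (hop2 : op ≠ ")") {b : Bool} {l : List String}
    (hw : Wf op b l) :
    (if b then ∀ (x : List String) (p : Nat) (st : List Nat),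
        bGo op (l ++ x) p st = around_unary_op.aGo op l ++ (List.replicate p ")" ++ bGo op x 0 st)
     else ∀ (x : List String) (st : List Nat),
        bGo op (l ++ x) 0 st = around_unary_op.aGo op l ++ bGo op x 0 st) := by
  induction hw with
  | atom a ha1 ha2 ha3 ha4 =>
    simp only [if_pos rfl]
    intro x p st
    simp only [List.cons_append, List.nil_append]
    rw [bGo_cons, if_neg ha1, if_neg ha3, if_neg ha4, if_neg ha2]
    rw [aGo_cons_ne ha1, aGo_nil]
    rfl
  | par s hs ihs =>
    simp only [if_pos rfl]
    intro x p st
    have hp1 : ("(" : String) ≠ op := fun e => hop1 e.symm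
    have hp2 : (")" : String) ≠ op := fun e => hop2 e.symm
    have h1 : ("(" : String) = "(" := rfl
    simp only [List.cons_append, List.append_assoc, List.singleton_append, List.nil_append]
    rw [bGo_cons, if_neg hp1, if_pos h1]
    simp only [if_neg (Bool.false_ne_true)] at ihs
    rw [ihs (")" :: x) (p :: st)]
    rw [bGo_cons, if_neg hp2, if_neg (by decide : (")" : String) ≠ "("), if_pos rfl]
    rw [aGo_cons_ne hp1, aGo_append hop1 hop2 hs [")"], aGo_cons_ne hp2, aGo_nil]
    simp
  | bang t ht iht =>
    simp only [if_pos rfl] at iht ⊢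
    intro x p st
    by_cases hbo : op = "!"
    · subst hbo
      simp only [List.cons_append]
      rw [bGo_cons, if_pos rfl]
      rw [iht x (p + 1) st]
      rw [aGo_cons_op (r := t) (by simpa using fslice_item hop1 hop2 ht rfl []), aGo_nil]
      simp [List.replicate_succ]
    · have hb : ("!" : String) ≠ op := fun e => hbo e.symm
      simp only [List.cons_append]
      rw [bGo_cons, if_neg hb, if_neg (by decide : ("!" : String) ≠ "("),
        if_neg (by decide : ("!" : String) ≠ ")"), if_pos rfl]
      rw [iht x p st, aGo_cons_ne hb]
      simp
  | nil =>
    simp only [if_neg (Bool.false_ne_true)]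
    intro x st
    rw [aGo_nil]
    simp
  | consI t s ht hh hs iht ihs =>
    simp only [if_pos rfl] at iht
    simp only [if_neg (Bool.false_ne_true)] at ihs ⊢
    intro x st
    rw [List.append_assoc, iht (s ++ x) 0 st, ihs x st,
      aGo_append hop1 hop2 ht s]
    simp
  | consOp t s ht hs iht ihs =>
    simp only [if_pos rfl] at iht
    simp only [if_neg (Bool.false_ne_true)] at ihs ⊢
    intro x st
    simp only [List.cons_append, List.append_assoc]
    rw [bGo_cons, if_pos rfl, iht (s ++ x) 1 st, ihs x st,
      aGo_cons_op (r := t ++ s) (fslice_item hop1 hop2 ht rfl s)]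
    simp
  | consBang s hob hs ihs =>
    simp only [if_neg (Bool.false_ne_true)] at ihs ⊢
    intro x st
    have hb : ("!" : String) ≠ op := fun e => hob e.symm
    simp only [List.cons_append]
    rw [bGo_cons, if_neg hb, if_neg (by decide : ("!" : String) ≠ "("),
      if_neg (by decide : ("!" : String) ≠ ")"), if_pos rfl]
    rw [ihs x st, aGo_cons_ne hb]
    rfl

theorem aGo_id {op : String} : ∀ l : List String, op ∉ l → around_unary_op.aGo op l = l := by
  intro l
  induction l with
  | nil => intro _; simp [around_unary_op.aGo]
  | cons t r ih =>
    intro h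
    have ht : t ≠ op := by intro e; exact h (by simp [e])
    rw [aGo_cons_ne ht, ih (fun hm => h (List.mem_cons_of_mem _ hm))]

theorem bGo_id {op : String} : ∀ l : List String, op ∉ l → ∀ st : List Nat,
    (∀ x ∈ st, x = 0) → bGo op l 0 st = l := by
  intro l
  induction l with
  | nil => intro _ st _; rfl
  | cons t r ih =>
    intro h st hst
    have ht : t ≠ op := by intro e; exact h (by simp [e])
    have hr : op ∉ r := fun hm => h (List.mem_cons_of_mem _ hm)
    rw [bGo_cons, if_neg ht]
    by_cases h1 : t = "("
    · rw [if_pos h1, ih hr (0 :: st) ?_, h1]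
      intro x hx
      rcases List.mem_cons.mp hx with he | hx
      · exact he
      · exact hst _ hx
    · rw [if_neg h1]
      by_cases h2 : t = ")"
      · rw [if_pos h2]
        cases st with
        | nil =>
          show ")" :: bGo op r 0 [] = t :: r
          rw [ih hr [] (by intro x hx; cases hx), h2]
        | cons pq st' =>
          have hp : pq = 0 := hst pq (by simp)
          subst hp
          show ")" :: (List.replicate 0 ")" ++ bGo op r 0 st') = t :: r
          rw [ih hr st' (fun x hx => hst x (List.mem_cons_of_mem _ hx)), h2]
          simp
      · rw [if_neg h2]
        by_cases h3 : t = "!"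
        · rw [if_pos h3, ih hr st hst, h3]
        · rw [if_neg h3, ih hr st hst]
          simp

-- ===== VERDICT (by name: the statement is the Claim_ definition above) =====
theorem around_unary_op_spec : Claim_equal_around_unary_op := by
  intro sentence op _ hpre
  unfold Spec_around_unary_op around_unary_op_alt
  show around_unary_op sentence op = bGo op sentence 0 []
  unfold around_unary_op
  cases hpre with
  | inl h =>
    rw [aGo_id _ h, bGo_id _ h [] (by intro x hx; cases hx)]
  | inr h =>
    obtain ⟨h1, h2, h3⟩ := h
    have hw := chk_wf h3
    have := bGo_wf h1 h2 hw
    simp only [if_neg (Bool.false_ne_true)] at this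
    have h4 := this [] []
    rw [List.append_nil] at h4
    simpa [bGo] using h4.symm
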